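-- pv_equiv track=rewrite | github.com/yogev-namir/AI-HW2 | ex2.py | classify_locations_in_map
-- ===== SOURCE A (Python) =====
-- def classify_locations_in_map(map):
--     i_locations, non_i_locations = [], []
--     for row_idx, row in enumerate(map):
--         for col_idx, cell in enumerate(row):
--             if cell == 'I':
--                 i_locations.append((row_idx, col_idx))
--             else:
--                 non_i_locations.append((row_idx, col_idx))
--     return non_i_locations, i_locations
-- ===== SOURCE B (Python) =====
-- def classify_locations_in_map(map):
--     # First pass: collect only the I-coordinates and index them in a hash set.
--     i_locations = [(r, c) for r, row in enumerate(map)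
--                    for c, cell in enumerate(row) if cell == 'I']
--     i_set = set(i_locations)
--     # Second pass: enumerate the coordinate space alone (never re-reading cell
--     # values) and take the set-complement of the I-index.
--     non_i_locations = [(r, c) for r, row in enumerate(map)
--                        for c in range(len(row)) if (r, c) not in i_set]
--     return non_i_locations, i_locations
-- ===== Notes on version B (the rewrite author's own statement) =====
-- stated objective: alternative
-- what changed: Instead of value-testing every cell and routing it into one of two accumulators, B extracts only the I-coordinates, indexes them in a hash set, and derives the non-I list as the set-complement of that index within a pure coordinate enumeration (non-I cells are never value-tested).
import Mathlib
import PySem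

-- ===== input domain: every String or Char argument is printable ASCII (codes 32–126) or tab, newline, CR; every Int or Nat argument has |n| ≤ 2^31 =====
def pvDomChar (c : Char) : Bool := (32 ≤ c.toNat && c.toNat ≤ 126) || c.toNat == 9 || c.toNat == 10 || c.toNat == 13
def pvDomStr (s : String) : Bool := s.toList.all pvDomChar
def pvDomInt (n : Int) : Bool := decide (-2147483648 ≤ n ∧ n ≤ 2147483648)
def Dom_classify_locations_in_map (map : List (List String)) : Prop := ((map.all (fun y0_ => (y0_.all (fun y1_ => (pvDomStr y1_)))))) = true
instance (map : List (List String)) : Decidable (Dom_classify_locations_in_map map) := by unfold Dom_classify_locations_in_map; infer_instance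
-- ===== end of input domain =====

-- B extracts only the I-coordinates, indexes them in a set, and derives the non-I list
-- as the set-complement of that index within a pure coordinate enumeration; same cost.

-- ===== PORT A =====
def classify_locations_in_map (map : List (List String)) : (List (Int × Int)) × (List (Int × Int)) :=
  let acc :=
    (PySem.List.enumerate map 0).foldl
      (fun acc rr =>
        (PySem.List.enumerate rr.2 0).foldl
          (fun acc cc =>
            if cc.2 = "I" then (acc.1 ++ [(rr.1, cc.1)], acc.2)
            else (acc.1, acc.2 ++ [(rr.1, cc.1)]))
          acc)
      (([] : List (Int × Int)), ([] : List (Int × Int)))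
  (acc.2, acc.1)

-- ===== PORT B =====
def classify_locations_in_map_alt (map : List (List String)) : (List (Int × Int)) × (List (Int × Int)) :=
  let i_locations : List (Int × Int) :=
    (PySem.List.enumerate map 0).flatMap (fun rr =>
      ((PySem.List.enumerate rr.2 0).filter (fun cc => cc.2 == "I")).map (fun cc => (rr.1, cc.1)))
  let i_set : PySem.Set (Int × Int) := PySem.Set.ofList i_locations
  let non_i_locations : List (Int × Int) :=
    (PySem.List.enumerate map 0).flatMap (fun rr =>
      ((PySem.List.pyRange 0 (rr.2.length : Int) 1).filter
        (fun c => !(PySem.Set.contains i_set (rr.1, c)))).map (fun c => (rr.1, c)))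
  (non_i_locations, i_locations)

-- ===== PRECONDITION & SPEC =====
def Spec_classify_locations_in_map (map : List (List String)) (out : (List (Int × Int)) × (List (Int × Int))) : Prop := out = classify_locations_in_map_alt map
instance (map : List (List String)) (out : (List (Int × Int)) × (List (Int × Int))) : Decidable (Spec_classify_locations_in_map map out) := by unfold Spec_classify_locations_in_map; infer_instance

-- ===== CLAIM (what is proved, stated in full; the proofs are below) =====
def Claim_equal_classify_locations_in_map : Prop := ∀ (map : List (List String)), Dom_classify_locations_in_map map → Spec_classify_locations_in_map map (classify_locations_in_map map)

-- ===== LEMMAS AND PROOFS =====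

-- A's inner loop routes one row into the two accumulators.
theorem inner_foldl_eq (l : List (Int × String)) (r : Int) (acc : List (Int × Int) × List (Int × Int)) :
    l.foldl (fun acc cc =>
        if cc.2 = "I" then (acc.1 ++ [(r, cc.1)], acc.2)
        else (acc.1, acc.2 ++ [(r, cc.1)])) acc
    = (acc.1 ++ (l.filter (fun cc => cc.2 == "I")).map (fun cc => (r, cc.1)),
       acc.2 ++ (l.filter (fun cc => cc.2 != "I")).map (fun cc => (r, cc.1))) := by
  induction l generalizing acc with
  | nil => simp
  | cons hd tl ih =>
    by_cases h : hd.2 = "I" <;> simp [h, ih]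

-- A's outer loop is the concatenation of the per-row routings.
theorem outer_foldl_eq (l : List (Int × List String)) (acc : List (Int × Int) × List (Int × Int)) :
    l.foldl (fun acc rr =>
        (PySem.List.enumerate rr.2 0).foldl
          (fun acc cc =>
            if cc.2 = "I" then (acc.1 ++ [(rr.1, cc.1)], acc.2)
            else (acc.1, acc.2 ++ [(rr.1, cc.1)])) acc) acc
    = (acc.1 ++ l.flatMap (fun rr =>
         ((PySem.List.enumerate rr.2 0).filter (fun cc => cc.2 == "I")).map (fun cc => (rr.1, cc.1))),
       acc.2 ++ l.flatMap (fun rr =>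
         ((PySem.List.enumerate rr.2 0).filter (fun cc => cc.2 != "I")).map (fun cc => (rr.1, cc.1)))) := by
  induction l generalizing acc with
  | nil => simp
  | cons hd tl ih =>
    rw [List.foldl_cons, inner_foldl_eq, ih]
    simp

-- Characterisation of membership in B's I-coordinate list.
theorem mem_ilocs (map : List (List String)) (p : Int × Int) :
    p ∈ (PySem.List.enumerate map 0).flatMap (fun rr =>
      ((PySem.List.enumerate rr.2 0).filter (fun cc => cc.2 == "I")).map (fun cc => (rr.1, cc.1)))
    ↔ ∃ (kr kc : Nat) (h1 : kr < map.length) (h2 : kc < map[kr].length),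
        p = ((kr : Int), (kc : Int)) ∧ map[kr][kc] = "I" := by
  simp only [List.mem_flatMap, List.mem_map, List.mem_filter, PySem.List.mem_enumerate_iff]
  constructor
  · rintro ⟨rr, ⟨kr, h1, hrr⟩, cc, ⟨⟨kc, h2, hcc⟩, hI⟩, hp⟩
    subst hrr
    subst hcc
    simp only [beq_iff_eq] at hI
    exact ⟨kr, kc, h1, h2, by simp [← hp], hI⟩
  · rintro ⟨kr, kc, h1, h2, hp, hI⟩
    exact ⟨((kr : Int), map[kr]), ⟨kr, h1, by simp⟩,
      ((kc : Int), map[kr][kc]), ⟨⟨kc, h2, by simp⟩, by simp [hI]⟩, by simp [hp]⟩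

-- For an in-range coordinate, membership in the I-set is the cell test.
theorem set_contains_iff (map : List (List String)) (kr kc : Nat)
    (h1 : kr < map.length) (h2 : kc < map[kr].length) :
    (((kr : Int), (kc : Int)) ∈ (PySem.List.enumerate map 0).flatMap (fun rr =>
      ((PySem.List.enumerate rr.2 0).filter (fun cc => cc.2 == "I")).map (fun cc => (rr.1, cc.1))))
    ↔ map[kr][kc] = "I" := by
  rw [mem_ilocs]
  constructor
  · rintro ⟨kr', kc', h1', h2', hp, hI⟩
    simp only [Prod.mk.injEq, Int.natCast_inj] at hp
    obtain ⟨e1, e2⟩ := hp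
    subst e1; subst e2
    exact hI
  · intro hI
    exact ⟨kr, kc, h1, h2, rfl, hI⟩

-- Per-row: complementing the I-set over the plain column range
-- equals filtering the enumerated row by cell ≠ "I".
theorem row_complement_eq (map : List (List String)) (kr : Nat) (h1 : kr < map.length) :
    ((PySem.List.pyRange 0 (map[kr].length : Int) 1).filter
        (fun c => !(PySem.Set.contains (PySem.Set.ofList
          ((PySem.List.enumerate map 0).flatMap (fun rr =>
            ((PySem.List.enumerate rr.2 0).filter (fun cc => cc.2 == "I")).map (fun cc => (rr.1, cc.1)))))
          ((kr : Int), c)))).map (fun c => ((kr : Int), c))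
    = ((PySem.List.enumerate map[kr] 0).filter (fun cc => cc.2 != "I")).map (fun cc => ((kr : Int), cc.1)) := by
  rw [PySem.List.enumerate_eq_map_pyRange map[kr] "", PySem.List.len_eq]
  rw [List.filter_map, List.map_map]
  congr 1
  apply List.filter_congr
  intro c hc
  rw [PySem.List.mem_pyRange_one] at hc
  obtain ⟨hc0, hclt⟩ := hc
  obtain ⟨kc, rfl⟩ := Int.eq_ofNat_of_zero_le hc0
  have h2 : kc < map[kr].length := by exact_mod_cast hclt
  simp only [Function.comp]
  have hmem := set_contains_iff map kr kc h1 h2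
  have hget : PySem.List.pyGetD map[kr] (kc : Int) "" = map[kr][kc] := by
    simp [PySem.List.pyGetD_natCast, h2]
  rw [hget]
  by_cases hI : map[kr][kc] = "I"
  · simp [hI, PySem.Set.contains, PySem.Set.mem_ofList, hmem.mpr hI]
  · have : ((kr : Int), (kc : Int)) ∉ PySem.Set.ofList
        ((PySem.List.enumerate map 0).flatMap (fun rr =>
          ((PySem.List.enumerate rr.2 0).filter (fun cc => cc.2 == "I")).map (fun cc => (rr.1, cc.1)))) := by
      rw [PySem.Set.mem_ofList]
      exact fun h => hI (hmem.mp h)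
    simp [hI, PySem.Set.contains, this]

-- ===== VERDICT (by name: the statement is the Claim_ definition above) =====
theorem classify_locations_in_map_spec : Claim_equal_classify_locations_in_map := by
  intro m _
  unfold Spec_classify_locations_in_map classify_locations_in_map classify_locations_in_map_alt
  rw [outer_foldl_eq]
  simp only [List.nil_append]
  refine Prod.ext ?_ rfl
  show _ = List.flatMap _ _
  apply List.flatMap_congr
  intro rr hrr
  rw [PySem.List.mem_enumerate_iff] at hrr
  obtain ⟨kr, h1, rfl⟩ := hrr
  simpa using (row_complement_eq m kr h1).symm
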